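-- pv_equiv track=rewrite | github.com/brcrusoe72/traksys-oee-analyzer | traksys-oee-analyzer/shared.py | classify_support
-- ===== SOURCE A (Python) =====
-- def classify_support(equipment_list, notes):
--     """Short support classification from equipment mentions and notes."""
--     if not equipment_list:
--         return ""
--     needs = []
--     equip_set = set(equipment_list)
--     if "Riverwood" in equip_set:
--         needs.append("Caser")
--     if "Kayat (Tray/Shrink/Wrap)" in equip_set:
--         needs.append("Kayat")
--     if "Labeler" in equip_set:
--         needs.append("Labeler")
--     if "Palletizer" in equip_set:
--         needs.append("Palletizer")
--     if "Conveyors" in equip_set: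
--         needs.append("Conveyor")
--     if "Depal" in equip_set:
--         needs.append("Depal")
--     if "Spiral" in equip_set:
--         needs.append("Spiral")
--
--     if notes:
--         lower = str(notes).lower()
--         if any(w in lower for w in ["labor", "checker", "short staff", "no checker"]):
--             needs.append("Staffing")
--
--     if len(equip_set) >= 3:
--         return "MULTIPLE"
--     return ", ".join(needs) if needs else ""
-- ===== SOURCE B (Python) =====
-- _RANKED = {
--     "Riverwood": (0, "Caser"),
--     "Kayat (Tray/Shrink/Wrap)": (1, "Kayat"),
--     "Labeler": (2, "Labeler"),
--     "Palletizer": (3, "Palletizer"),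
--     "Conveyors": (4, "Conveyor"),
--     "Depal": (5, "Depal"),
--     "Spiral": (6, "Spiral"),
-- }
-- _KEYWORDS = ("labor", "checker", "short staff", "no checker")
--
-- def classify_support(equipment_list, notes):
--     """Short support classification from equipment mentions and notes."""
--     if not equipment_list:
--         return ""
--     distinct = set(equipment_list)
--     if len(distinct) >= 3:
--         return "MULTIPLE"
--     hits = sorted((_RANKED[e] for e in distinct if e in _RANKED), key=lambda t: t[0])
--     needs = [label for _, label in hits]
--     if notes and any(w in str(notes).lower() for w in _KEYWORDS):
--         needs.append("Staffing")
--     return ", ".join(needs)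
-- ===== Notes on version B (the rewrite author's own statement) =====
-- stated objective: alternative
-- what changed: Inverts the lookup direction: instead of seven fixed membership tests against the equipment set, B indexes each distinct equipment item in a rank dictionary, sorts the (rank, label) hits to restore the canonical order, and returns MULTIPLE early before computing any needs.
import Mathlib
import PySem

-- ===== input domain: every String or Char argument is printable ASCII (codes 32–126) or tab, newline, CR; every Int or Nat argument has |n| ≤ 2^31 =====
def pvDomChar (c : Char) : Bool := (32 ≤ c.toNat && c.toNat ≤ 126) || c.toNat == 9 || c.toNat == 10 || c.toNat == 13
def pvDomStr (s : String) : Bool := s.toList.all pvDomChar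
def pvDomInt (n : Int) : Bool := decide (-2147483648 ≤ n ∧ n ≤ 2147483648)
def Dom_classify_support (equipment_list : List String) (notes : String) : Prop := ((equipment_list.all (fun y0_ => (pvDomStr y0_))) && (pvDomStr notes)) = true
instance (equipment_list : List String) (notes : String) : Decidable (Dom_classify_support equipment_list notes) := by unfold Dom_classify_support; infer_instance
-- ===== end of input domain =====

-- B inverts the lookup direction: instead of scanning seven fixed membership tests, it indexes each distinct
-- equipment item in a rank dictionary, sorts the hits by rank, and gates MULTIPLE early (alternative decomposition).


-- ===== PORT A =====
def classify_support (equipment_list : List String) (notes : String) : String :=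
  if equipment_list = [] then "" else
  let equip_set : PySem.Set String := PySem.Set.ofList equipment_list
  let needs : List String := []
  let needs := if PySem.Set.contains equip_set "Riverwood" then needs ++ ["Caser"] else needs
  let needs := if PySem.Set.contains equip_set "Kayat (Tray/Shrink/Wrap)" then needs ++ ["Kayat"] else needs
  let needs := if PySem.Set.contains equip_set "Labeler" then needs ++ ["Labeler"] else needs
  let needs := if PySem.Set.contains equip_set "Palletizer" then needs ++ ["Palletizer"] else needs
  let needs := if PySem.Set.contains equip_set "Conveyors" then needs ++ ["Conveyor"] else needs
  let needs := if PySem.Set.contains equip_set "Depal" then needs ++ ["Depal"] else needs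
  let needs := if PySem.Set.contains equip_set "Spiral" then needs ++ ["Spiral"] else needs
  let needs :=
    if notes ≠ "" then
      let lower := PySem.Str.lower notes
      if ["labor", "checker", "short staff", "no checker"].any (fun w => PySem.Str.isIn w lower) then
        needs ++ ["Staffing"]
      else needs
    else needs
  if 3 ≤ PySem.Set.len equip_set then "MULTIPLE"
  else if needs ≠ [] then PySem.Str.join ", " needs else ""

-- ===== PORT B =====
def pvRanked : PySem.Dict String (Int × String) :=
  PySem.Dict.ofList [("Riverwood", ((0 : Int), "Caser")), ("Kayat (Tray/Shrink/Wrap)", (1, "Kayat")), ("Labeler", (2, "Labeler")), ("Palletizer", (3, "Palletizer")), ("Conveyors", (4, "Conveyor")), ("Depal", (5, "Depal")), ("Spiral", (6, "Spiral"))]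

def pvKeywords : List String := ["labor", "checker", "short staff", "no checker"]

-- `_RANKED[e] for e in distinct if e in _RANKED` is the guarded dict lookup: get? is some exactly on contained
-- keys, so filterMap get? is exact. Python iterates the set in hash order; the result is consumed only under a
-- sort whose rank key is injective on the hits, so iterating in first-insertion order is exact.
def classify_support_alt (equipment_list : List String) (notes : String) : String :=
  if equipment_list = [] then "" else
  let distinct : PySem.Set String := PySem.Set.ofList equipment_list
  if 3 ≤ PySem.Set.len distinct then "MULTIPLE" else
  let hits : List (Int × String) := PySem.List.sorted (distinct.filterMap (fun e => pvRanked.get? e)) (fun t => t.1)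
  let needs : List String := hits.map (fun t => t.2)
  let needs :=
    if notes ≠ "" ∧ pvKeywords.any (fun w => PySem.Str.isIn w (PySem.Str.lower notes)) then
      needs ++ ["Staffing"]
    else needs
  PySem.Str.join ", " needs

-- ===== PRECONDITION & SPEC =====
def Spec_classify_support (equipment_list : List String) (notes : String) (out : String) : Prop := out = classify_support_alt equipment_list notes
instance (equipment_list : List String) (notes : String) (out : String) : Decidable (Spec_classify_support equipment_list notes out) := by unfold Spec_classify_support; infer_instance

-- ===== CLAIM (what is proved, stated in full; the proofs are below) =====
def Claim_equal_classify_support : Prop := ∀ (equipment_list : List String) (notes : String), Dom_classify_support equipment_list notes → Spec_classify_support equipment_list notes (classify_support equipment_list notes)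

-- ===== LEMMAS AND PROOFS =====
-- the rank table as an association list, for reasoning about pvRanked and A's if-chain
def pvEntries : List (String × (Int × String)) :=
  [("Riverwood", ((0 : Int), "Caser")), ("Kayat (Tray/Shrink/Wrap)", (1, "Kayat")), ("Labeler", (2, "Labeler")), ("Palletizer", (3, "Palletizer")), ("Conveyors", (4, "Conveyor")), ("Depal", (5, "Depal")), ("Spiral", (6, "Spiral"))]

lemma get?_ranked (a : String) : pvRanked.get? a =
    if "Riverwood" = a then some ((0 : Int), "Caser")
    else if "Kayat (Tray/Shrink/Wrap)" = a then some (1, "Kayat")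
    else if "Labeler" = a then some (2, "Labeler")
    else if "Palletizer" = a then some (3, "Palletizer")
    else if "Conveyors" = a then some (4, "Conveyor")
    else if "Depal" = a then some (5, "Depal")
    else if "Spiral" = a then some (6, "Spiral")
    else none := by
  have hmk : pvRanked = PySem.Dict.mk pvEntries := by decide
  have find_pos : ∀ {k : String} {v : Int × String} {rest : List (String × (Int × String))},
      ((fun p : String × (Int × String) => p.1 == a) (k, v)) = true →
      List.find? (fun p : String × (Int × String) => p.1 == a) ((k, v) :: rest) = some (k, v) := by
    intro k v rest h; exact List.find?_cons_of_pos h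
  have find_neg : ∀ {k : String} {v : Int × String} {rest : List (String × (Int × String))},
      ¬ ((fun p : String × (Int × String) => p.1 == a) (k, v)) = true →
      List.find? (fun p : String × (Int × String) => p.1 == a) ((k, v) :: rest) = List.find? (fun p => p.1 == a) rest := by
    intro k v rest h; exact List.find?_cons_of_neg h
  rw [hmk]
  simp only [PySem.Dict.get?, pvEntries]
  by_cases h0 : "Riverwood" = a
  · rw [if_pos h0, find_pos (by simp [h0])]; rfl
  · rw [if_neg h0, find_neg (by simp [h0])]
    by_cases h1 : "Kayat (Tray/Shrink/Wrap)" = a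
    · rw [if_pos h1, find_pos (by simp [h1])]; rfl
    · rw [if_neg h1, find_neg (by simp [h1])]
      by_cases h2 : "Labeler" = a
      · rw [if_pos h2, find_pos (by simp [h2])]; rfl
      · rw [if_neg h2, find_neg (by simp [h2])]
        by_cases h3 : "Palletizer" = a
        · rw [if_pos h3, find_pos (by simp [h3])]; rfl
        · rw [if_neg h3, find_neg (by simp [h3])]
          by_cases h4 : "Conveyors" = a
          · rw [if_pos h4, find_pos (by simp [h4])]; rfl
          · rw [if_neg h4, find_neg (by simp [h4])]
            by_cases h5 : "Depal" = a
            · rw [if_pos h5, find_pos (by simp [h5])]; rfl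
            · rw [if_neg h5, find_neg (by simp [h5])]
              by_cases h6 : "Spiral" = a
              · rw [if_pos h6, find_pos (by simp [h6])]; rfl
              · rw [if_neg h6, find_neg (by simp [h6])]
                rfl

lemma get?_ranked_some_iff (a : String) (v : Int × String) : pvRanked.get? a = some v ↔
    ("Riverwood" = a ∧ v = (0, "Caser")) ∨ ("Kayat (Tray/Shrink/Wrap)" = a ∧ v = (1, "Kayat")) ∨
    ("Labeler" = a ∧ v = (2, "Labeler")) ∨ ("Palletizer" = a ∧ v = (3, "Palletizer")) ∨
    ("Conveyors" = a ∧ v = (4, "Conveyor")) ∨ ("Depal" = a ∧ v = (5, "Depal")) ∨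
    ("Spiral" = a ∧ v = (6, "Spiral")) := by
  rw [get?_ranked]
  split_ifs with h0 h1 h2 h3 h4 h5 h6
  · subst h0; simp [eq_comm]
  · subst h1; simp [eq_comm]
  · subst h2; simp [eq_comm]
  · subst h3; simp [eq_comm]
  · subst h4; simp [eq_comm]
  · subst h5; simp [eq_comm]
  · subst h6; simp [eq_comm]
  · simp [h0, h1, h2, h3, h4, h5, h6]

-- the sort by rank puts the looked-up hits back in A's table order
lemma hits_eq (s : List String) (hnd : s.Nodup) :
    PySem.List.sorted (s.filterMap (fun e => pvRanked.get? e)) (fun t => t.1) =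
      (pvEntries.filter (fun p => PySem.Set.contains s p.1)).map (fun p => p.2) := by
  have hsub : ((pvEntries.filter (fun p => PySem.Set.contains s p.1)).map (fun p => p.2)).Sublist
      (pvEntries.map (fun p => p.2)) := List.Sublist.map _ List.filter_sublist
  have hfull : (pvEntries.map (fun p : String × (Int × String) => p.2)).Nodup := by decide
  apply PySem.List.sorted_eq_of_perm_of_pairwise_lt
  · have hys : ((pvEntries.filter (fun p => PySem.Set.contains s p.1)).map (fun p => p.2)).Nodup :=
      List.Nodup.sublist hsub hfull
    have hxs : (s.filterMap (fun e => pvRanked.get? e)).Nodup := by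
      refine List.Nodup.filterMap ?_ hnd
      intro a a' b hb hb'
      rw [Option.mem_def, get?_ranked_some_iff] at hb hb'
      rcases hb with ⟨rfl, rfl⟩|⟨rfl, rfl⟩|⟨rfl, rfl⟩|⟨rfl, rfl⟩|⟨rfl, rfl⟩|⟨rfl, rfl⟩|⟨rfl, rfl⟩ <;>
        simp_all
    rw [List.perm_ext_iff_of_nodup hys hxs]
    intro v
    simp only [List.mem_filterMap, get?_ranked_some_iff, List.mem_map, List.mem_filter, pvEntries,
      List.mem_cons, List.not_mem_nil, or_false, PySem.Set.contains_eq_listContains,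
      List.contains_eq_mem, decide_eq_true_eq]
    constructor
    · rintro ⟨p, ⟨hp, hmem⟩, rfl⟩
      rcases hp with rfl|rfl|rfl|rfl|rfl|rfl|rfl <;> (refine ⟨_, hmem, ?_⟩; simp)
    · rintro ⟨e, he, h⟩
      rcases h with ⟨rfl, rfl⟩|⟨rfl, rfl⟩|⟨rfl, rfl⟩|⟨rfl, rfl⟩|⟨rfl, rfl⟩|⟨rfl, rfl⟩|⟨rfl, rfl⟩
      · exact ⟨("Riverwood", ((0 : Int), "Caser")), ⟨by simp, he⟩, rfl⟩
      · exact ⟨("Kayat (Tray/Shrink/Wrap)", ((1 : Int), "Kayat")), ⟨by simp, he⟩, rfl⟩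
      · exact ⟨("Labeler", ((2 : Int), "Labeler")), ⟨by simp, he⟩, rfl⟩
      · exact ⟨("Palletizer", ((3 : Int), "Palletizer")), ⟨by simp, he⟩, rfl⟩
      · exact ⟨("Conveyors", ((4 : Int), "Conveyor")), ⟨by simp, he⟩, rfl⟩
      · exact ⟨("Depal", ((5 : Int), "Depal")), ⟨by simp, he⟩, rfl⟩
      · exact ⟨("Spiral", ((6 : Int), "Spiral")), ⟨by simp, he⟩, rfl⟩
  · exact List.Pairwise.sublist hsub (by decide)

-- A's unrolled if-chain is the label column of the rank table filtered by membership
lemma chain_eq (s : PySem.Set String) :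
    (((pvEntries.filter (fun p => PySem.Set.contains s p.1)).map (fun p => p.2)).map (fun t => t.2)) =
      (let n : List String := []
       let n := if PySem.Set.contains s "Riverwood" then n ++ ["Caser"] else n
       let n := if PySem.Set.contains s "Kayat (Tray/Shrink/Wrap)" then n ++ ["Kayat"] else n
       let n := if PySem.Set.contains s "Labeler" then n ++ ["Labeler"] else n
       let n := if PySem.Set.contains s "Palletizer" then n ++ ["Palletizer"] else n
       let n := if PySem.Set.contains s "Conveyors" then n ++ ["Conveyor"] else n
       let n := if PySem.Set.contains s "Depal" then n ++ ["Depal"] else n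
       if PySem.Set.contains s "Spiral" then n ++ ["Spiral"] else n) := by
  have h := PySem.List.foldl_append_if (fun p : String × (Int × String) => PySem.Set.contains s p.1)
      (fun p => p.2.2) pvEntries []
  simp only [pvEntries, List.foldl_cons, List.foldl_nil, List.nil_append] at h
  rw [List.map_map]
  simpa using h.symm

lemma pv_join_empty (l : List String) :
    (if ¬ l = [] then PySem.Str.join ", " l else "") = PySem.Str.join ", " l := by
  cases l with
  | nil => simp [PySem.Str.join]
  | cons x xs => simp

-- ===== VERDICT (by name: the statement is the Claim_ definition above) =====
theorem classify_support_spec : Claim_equal_classify_support := by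
  intro el notes _
  unfold Spec_classify_support classify_support classify_support_alt
  by_cases hel : el = []
  · rw [if_pos hel, if_pos hel]
  · rw [if_neg hel, if_neg hel]
    simp only [ne_eq]
    by_cases h3 : 3 ≤ PySem.Set.len (PySem.Set.ofList el)
    · rw [if_pos h3, if_pos h3]
    · rw [if_neg h3, if_neg h3, pv_join_empty]
      congr 1
      have hchain := (chain_eq (PySem.Set.ofList el)).symm
      rw [hits_eq (PySem.Set.ofList el) (PySem.Set.nodup_ofList el)] at *
      by_cases hn : notes = ""
      · rw [if_neg (not_not_intro hn),
            if_neg (fun h => h.1 hn : ¬((¬ notes = "") ∧ (pvKeywords.any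
              (fun w => PySem.Str.isIn w (PySem.Str.lower notes)) = true)))]
        exact hchain
      · by_cases ha : (["labor", "checker", "short staff", "no checker"].any
            (fun w => PySem.Str.isIn w (PySem.Str.lower notes))) = true
        · rw [if_pos hn, if_pos ha,
              if_pos (And.intro hn ha : (¬ notes = "") ∧ (pvKeywords.any
                (fun w => PySem.Str.isIn w (PySem.Str.lower notes)) = true))]
          exact congrArg (· ++ ["Staffing"]) hchain
        · rw [if_pos hn, if_neg ha,
              if_neg (fun h => ha h.2 : ¬((¬ notes = "") ∧ (pvKeywords.any
                (fun w => PySem.Str.isIn w (PySem.Str.lower notes)) = true)))]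
          exact hchain
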